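-- pv_equiv track=rewrite | github.com/ecci87/Tag2 | server.py | _slugify_video_training_preset_key
-- ===== SOURCE A (Python) =====
-- def _slugify_video_training_preset_key(value: str, fallback: str) -> str:
--     """Convert a preset label or key into a config-safe identifier."""
--     raw = str(value or fallback).strip().lower()
--     pieces: list[str] = []
--     previous_dash = False
--     for char in raw:
--         if char.isalnum():
--             pieces.append(char)
--             previous_dash = False
--             continue
--         if previous_dash:
--             continue
--         pieces.append("-")
--         previous_dash = True
--     normalized = "".join(pieces).strip("-")
--     return normalized or fallback
-- ===== SOURCE B (Python) =====
-- def _slugify_video_training_preset_key(value: str, fallback: str) -> str: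
--     """Convert a preset label or key into a config-safe identifier."""
--     raw = str(value or fallback).strip().lower()
--     parts: list[str] = []
--     i, n = 0, len(raw)
--     while i < n:
--         j = i
--         while j < n and raw[j].isalnum() == raw[i].isalnum():
--             j += 1
--         parts.append(raw[i:j] if raw[i].isalnum() else "-")
--         i = j
--     return "".join(parts).strip("-") or fallback
-- ===== Notes on version B (the rewrite author's own statement) =====
-- stated objective: alternative
-- what changed: Replaced the per-character previous_dash state machine with a two-pointer run scan that consumes one maximal alnum/non-alnum run at a time, emitting the run or a single '-'.
import Mathlib
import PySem

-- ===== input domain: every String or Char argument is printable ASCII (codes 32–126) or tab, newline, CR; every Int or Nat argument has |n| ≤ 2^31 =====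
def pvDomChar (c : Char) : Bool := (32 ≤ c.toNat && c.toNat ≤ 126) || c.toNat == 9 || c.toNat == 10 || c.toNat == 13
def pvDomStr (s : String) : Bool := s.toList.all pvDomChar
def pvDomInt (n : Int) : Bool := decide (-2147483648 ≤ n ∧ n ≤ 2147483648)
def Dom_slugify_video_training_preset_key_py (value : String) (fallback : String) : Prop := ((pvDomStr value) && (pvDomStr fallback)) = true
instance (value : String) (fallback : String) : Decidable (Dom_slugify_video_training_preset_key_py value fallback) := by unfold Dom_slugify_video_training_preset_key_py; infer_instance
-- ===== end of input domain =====

-- B replaces A's previous_dash state machine by a run-at-a-time two-pointer scan (alternative decomposition, same cost).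

-- ===== PORT A =====
-- the for-loop of A: state = (pieces, previous_dash), one character at a time
def slugAloop : List Char → List Char → Bool → List Char
  | [], pieces, _ => pieces
  | c :: cs, pieces, prev =>
    if PySem.Chars.isalnum c then slugAloop cs (pieces ++ [c]) false
    else if prev then slugAloop cs pieces true
    else slugAloop cs (pieces ++ ['-']) true

def slugify_video_training_preset_key_py (value : String) (fallback : String) : String :=
  let raw := PySem.Chars.lower (PySem.Chars.strip ((if value = "" then fallback else value).toList))
  let normalized := PySem.Chars.stripChars (slugAloop raw [] false) ['-']
  if normalized = [] then fallback else String.ofList normalized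


-- ===== PORT B =====
-- the while-loop of B: take the maximal run sharing the head's isalnum value, emit it (or '-'), recurse on the rest
def slugBruns : List Char → List Char
  | [] => []
  | c :: cs =>
    let grp := (c :: cs).takeWhile (fun d => PySem.Chars.isalnum d == PySem.Chars.isalnum c)
    let rest := (c :: cs).dropWhile (fun d => PySem.Chars.isalnum d == PySem.Chars.isalnum c)
    (if PySem.Chars.isalnum c then grp else ['-']) ++ slugBruns rest
  termination_by s => s.length
  decreasing_by
    simp only [List.dropWhile_cons, beq_self_eq_true, if_true]
    exact Nat.lt_succ_of_le (List.length_dropWhile_le _ _)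

def slugify_video_training_preset_key_py_alt (value : String) (fallback : String) : String :=
  let raw := PySem.Chars.lower (PySem.Chars.strip ((if value = "" then fallback else value).toList))
  let normalized := PySem.Chars.stripChars (slugBruns raw) ['-']
  if normalized = [] then fallback else String.ofList normalized

-- ===== PRECONDITION & SPEC =====
def Spec_slugify_video_training_preset_key_py (value : String) (fallback : String) (out : String) : Prop := out = slugify_video_training_preset_key_py_alt value fallback
instance (value : String) (fallback : String) (out : String) : Decidable (Spec_slugify_video_training_preset_key_py value fallback out) := by unfold Spec_slugify_video_training_preset_key_py; infer_instance

-- ===== CLAIM (what is proved, stated in full; the proofs are below) =====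
def Claim_equal_slugify_video_training_preset_key_py : Prop := ∀ (value : String) (fallback : String), Dom_slugify_video_training_preset_key_py value fallback → Spec_slugify_video_training_preset_key_py value fallback (slugify_video_training_preset_key_py value fallback)

-- ===== LEMMAS AND PROOFS =====

theorem slugBruns_nil : slugBruns [] = [] := by
  rw [slugBruns.eq_def]

theorem slugBruns_alnum_cons (c : Char) (cs : List Char) (h : PySem.Chars.isalnum c = true) :
    slugBruns (c :: cs) = c :: slugBruns cs := by
  conv_lhs => rw [slugBruns.eq_def]
  simp only [h, List.takeWhile_cons, List.dropWhile_cons, beq_self_eq_true, if_true]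
  cases cs with
  | nil => simp [slugBruns_nil]
  | cons d ds =>
    by_cases hd : PySem.Chars.isalnum d = true
    · conv_rhs => rw [slugBruns.eq_def]
      simp [hd]
    · simp [Bool.eq_false_iff.mpr hd]

theorem slugBruns_nonalnum_cons (c : Char) (cs : List Char) (h : PySem.Chars.isalnum c = false) :
    slugBruns (c :: cs) = '-' :: slugBruns (cs.dropWhile (fun d => PySem.Chars.isalnum d == false)) := by
  rw [slugBruns.eq_def]
  simp [h]

theorem slugAloop_eq (s : List Char) :
    (∀ acc, slugAloop s acc false = acc ++ slugBruns s) ∧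
    (∀ acc, slugAloop s acc true = acc ++ slugBruns (s.dropWhile (fun d => PySem.Chars.isalnum d == false))) := by
  induction s with
  | nil => constructor <;> intro acc <;> rw [slugBruns.eq_def] <;> simp [slugAloop]

  | cons c cs ih =>
    by_cases h : PySem.Chars.isalnum c = true
    · constructor <;> intro acc <;>
        simp only [slugAloop, h, if_true, List.dropWhile_cons, beq_iff_eq, Bool.true_eq_false,
          if_false, ih.1, slugBruns_alnum_cons c cs h, List.append_assoc, List.singleton_append]
    · have h' : PySem.Chars.isalnum c = false := Bool.eq_false_iff.mpr h
      constructor <;> intro acc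
      · simp only [slugAloop, h', Bool.false_eq_true, if_false, ih.2,
          slugBruns_nonalnum_cons c cs h', List.append_assoc, List.singleton_append]
      · simp only [slugAloop, h', Bool.false_eq_true, if_false, if_true, ih.2,
          List.dropWhile_cons, beq_self_eq_true]

-- ===== VERDICT (by name: the statement is the Claim_ definition above) =====
theorem slugify_video_training_preset_key_py_spec : Claim_equal_slugify_video_training_preset_key_py := by
  intro value fallback _
  unfold Spec_slugify_video_training_preset_key_py
  unfold slugify_video_training_preset_key_py slugify_video_training_preset_key_py_alt
  simp only []
  rw [(slugAloop_eq _).1, List.nil_append]
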